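-- pv_equiv track=rewrite | github.com/ashler-herrick/py-theta-client | scripts/find_missing.py | format_summary_report
-- ===== SOURCE A (Python) =====
-- def format_summary_report(missing_data):
--     """Generate a summary statistics report."""
--     lines = []
--     lines.append("=" * 60)
--     lines.append("MISSING DATA SUMMARY REPORT")
--     lines.append("=" * 60)
--     lines.append("")
--
--     total_tickers = len(missing_data)
--     total_days = sum(
--         count
--         for ticker_data in missing_data.values()
--         for year_data in ticker_data.values()
--         for count in year_data.values()
--     )
--
--     lines.append(f"Total tickers with missing data: {total_tickers}")
--     lines.append(f"Total missing days: {total_days}")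
--     lines.append("")
--
--     # Tickers with most missing days
--     ticker_counts = [
--         (ticker, sum(
--             count
--             for year_data in years.values()
--             for count in year_data.values()
--         ))
--         for ticker, years in missing_data.items()
--     ]
--     ticker_counts.sort(key=lambda x: x[1], reverse=True)
--
--     lines.append("Top 20 tickers by missing days:")
--     lines.append("-" * 40)
--     for ticker, count in ticker_counts[:20]:
--         lines.append(f"  {ticker:6s} : {count:4d} missing days")
--
--     return "\n".join(lines)
-- ===== SOURCE B (Python) =====
-- def format_summary_report(missing_data):
--     """Generate a summary statistics report."""
--     total_tickers = 0
--     total_days = 0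
--     top = []  # at most 20 entries, kept sorted by count descending (stable)
--     for ticker, years in missing_data.items():
--         subtotal = 0
--         for year_data in years.values():
--             for count in year_data.values():
--                 subtotal += count
--         total_tickers += 1
--         total_days += subtotal
--         # stable descending insert: skip every entry with count >= subtotal
--         i = 0
--         while i < len(top) and subtotal <= top[i][1]:
--             i += 1
--         top.insert(i, (ticker, subtotal))
--         del top[20:]
--     lines = [
--         "=" * 60,
--         "MISSING DATA SUMMARY REPORT",
--         "=" * 60,
--         "",
--         f"Total tickers with missing data: {total_tickers}",
--         f"Total missing days: {total_days}",
--         "",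
--         "Top 20 tickers by missing days:",
--         "-" * 40,
--     ]
--     for ticker, count in top:
--         lines.append(f"  {ticker:6s} : {count:4d} missing days")
--     return "\n".join(lines)
-- ===== Notes on version B (the rewrite author's own statement) =====
-- stated objective: alternative
-- what changed: B makes one pass over the nested dict carrying (ticker count, grand total, a stable-descending top-20 list maintained by bounded insertion and truncation) instead of A's staged passes: a separate triple-nested total, a full list build, a full library sort and a slice.
import Mathlib
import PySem

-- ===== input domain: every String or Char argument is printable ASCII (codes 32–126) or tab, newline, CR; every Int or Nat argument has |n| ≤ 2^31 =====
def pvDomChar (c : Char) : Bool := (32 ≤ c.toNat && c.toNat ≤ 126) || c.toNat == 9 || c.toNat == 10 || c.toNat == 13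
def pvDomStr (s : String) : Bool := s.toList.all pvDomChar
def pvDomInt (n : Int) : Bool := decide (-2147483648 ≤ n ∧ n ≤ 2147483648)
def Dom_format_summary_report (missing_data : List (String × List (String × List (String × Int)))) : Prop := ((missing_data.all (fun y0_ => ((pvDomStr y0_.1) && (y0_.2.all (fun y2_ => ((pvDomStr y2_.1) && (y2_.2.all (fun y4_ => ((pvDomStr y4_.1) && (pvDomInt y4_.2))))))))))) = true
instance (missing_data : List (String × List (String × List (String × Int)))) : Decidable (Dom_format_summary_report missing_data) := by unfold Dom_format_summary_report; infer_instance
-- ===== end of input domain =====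

-- B replaces A's staged passes (separate triple-nested grand total, full ticker_counts list,
-- library sort, slice) by ONE pass that carries (ticker count, grand total, top-20 list kept
-- sorted descending by bounded insertion); return values proved equal.

-- ===== PORT A =====
-- shared format helpers (both Pythons use the identical f-string "  {t:6s} : {c:4d} missing days")
-- f"{s:6s}" : left-justify to width 6 with spaces
def pvLjust6 (s : String) : String := String.ofList (s.toList ++ List.replicate (6 - s.toList.length) ' ')
-- f"{n:4d}" : right-justify str(n) to width 4 with spaces
def pvRjust4 (n : Int) : String := String.ofList (List.replicate (4 - (PySem.Int.toChars n).length) ' ' ++ PySem.Int.toChars n)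

def format_summary_report (missing_data : List (String × List (String × List (String × Int)))) : String :=
  -- lines.append(…) × 4
  let lines : List String := [String.ofList (List.replicate 60 '='), "MISSING DATA SUMMARY REPORT",
                              String.ofList (List.replicate 60 '='), ""]
  let total_tickers : Int := missing_data.length
  -- sum over the triple-nested generator (dict .values() = second components in order)
  let total_days : Int :=
    ((missing_data.map (·.2)).flatMap (fun ticker_data =>
      (ticker_data.map (·.2)).flatMap (fun year_data =>
        year_data.map (·.2)))).foldl (· + ·) 0
  let lines := lines ++ ["Total tickers with missing data: " ++ PySem.Int.toStr total_tickers,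
                         "Total missing days: " ++ PySem.Int.toStr total_days, ""]
  let ticker_counts : List (String × Int) :=
    missing_data.map (fun p =>
      (p.1, ((p.2.map (·.2)).flatMap (fun year_data => year_data.map (·.2))).foldl (· + ·) 0))
  let ticker_counts := PySem.List.sorted ticker_counts (fun x => x.2) true
  let lines := lines ++ ["Top 20 tickers by missing days:", String.ofList (List.replicate 40 '-')]
  let lines := lines ++ (ticker_counts.take 20).map (fun p =>
    "  " ++ pvLjust6 p.1 ++ " : " ++ pvRjust4 p.2 ++ " missing days")
  PySem.Str.join "\n" lines

-- ===== PORT B =====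
-- the while-scan + top.insert(i, …) is exactly a stable descending insertion:
-- PySem.List.insertBy places the new pair before the first entry with a strictly smaller count;
-- 'del top[20:]' is '.take 20'
def format_summary_report_alt (missing_data : List (String × List (String × List (String × Int)))) : String :=
  let st :=
    missing_data.foldl (fun (st : Int × Int × List (String × Int)) p =>
      let subtotal : Int := p.2.foldl (fun s yd => yd.2.foldl (fun s2 q => s2 + q.2) s) 0
      (st.1 + 1, st.2.1 + subtotal,
        (PySem.List.insertBy (fun a b => decide (b.2 < a.2)) (p.1, subtotal) st.2.2).take 20))
      (0, 0, [])
  let lines : List String :=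
    [String.ofList (List.replicate 60 '='), "MISSING DATA SUMMARY REPORT",
     String.ofList (List.replicate 60 '='), "",
     "Total tickers with missing data: " ++ PySem.Int.toStr st.1,
     "Total missing days: " ++ PySem.Int.toStr st.2.1, "",
     "Top 20 tickers by missing days:", String.ofList (List.replicate 40 '-')]
  let lines := lines ++ st.2.2.map (fun p =>
    "  " ++ pvLjust6 p.1 ++ " : " ++ pvRjust4 p.2 ++ " missing days")
  PySem.Str.join "\n" lines

-- ===== PRECONDITION & SPEC =====
def Spec_format_summary_report (missing_data : List (String × List (String × List (String × Int)))) (out : String) : Prop := out = format_summary_report_alt missing_data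
instance (missing_data : List (String × List (String × List (String × Int)))) (out : String) : Decidable (Spec_format_summary_report missing_data out) := by unfold Spec_format_summary_report; infer_instance

-- ===== CLAIM (what is proved, stated in full; the proofs are below) =====
def Claim_equal_format_summary_report : Prop := ∀ (missing_data : List (String × List (String × List (String × Int)))), Dom_format_summary_report missing_data → Spec_format_summary_report missing_data (format_summary_report missing_data)

-- ===== LEMMAS AND PROOFS =====

-- A's per-ticker subtotal, named for the proofs only
def pvSubA (p : String × List (String × List (String × Int))) : Int :=
  ((p.2.map (·.2)).flatMap (fun year_data => year_data.map (·.2))).foldl (· + ·) 0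

theorem pv_foldl_add_eq_sum (l : List Int) (a : Int) : l.foldl (· + ·) a = a + l.sum := by
  induction l generalizing a with
  | nil => simp
  | cons x t ih => simp [List.foldl, ih, List.sum_cons]; ring

theorem pv_foldl_add_snd (l : List (String × Int)) (a : Int) :
    l.foldl (fun s q => s + q.2) a = a + (l.map (·.2)).sum := by
  induction l generalizing a with
  | nil => simp
  | cons x t ih => simp [List.foldl, ih]; ring

-- B's nested-loop subtotal equals A's flattened subtotal
theorem pv_sub_eq (ys : List (String × List (String × Int))) (a : Int) :
    ys.foldl (fun s yd => yd.2.foldl (fun s2 q => s2 + q.2) s) a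
    = a + ((ys.map (·.2)).flatMap (fun yd => yd.map (·.2))).sum := by
  induction ys generalizing a with
  | nil => simp
  | cons y t ih =>
      simp only [List.foldl_cons, List.map_cons, List.flatMap_cons, List.sum_append]
      rw [ih, pv_foldl_add_snd]
      ring

-- A's grand total equals the sum of the per-ticker subtotals
theorem pv_totalA (md : List (String × List (String × List (String × Int)))) :
    ((md.map (·.2)).flatMap (fun td => (td.map (·.2)).flatMap (fun yd => yd.map (·.2)))).foldl (· + ·) (0:Int)
    = (md.map pvSubA).sum := by
  induction md with
  | nil => rfl
  | cons x t ih =>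
      simp only [List.map_cons, List.flatMap_cons, pv_foldl_add_eq_sum, List.sum_append,
        List.sum_cons] at *
      simp only [pvSubA, pv_foldl_add_eq_sum]
      omega

-- truncating before or after a single insertion gives the same first k entries
theorem pv_insertBy_take {α : Type} (before : α → α → Bool) (x : α) (l : List α) (k : Nat) :
    (PySem.List.insertBy before x (l.take k)).take k = (PySem.List.insertBy before x l).take k := by
  induction l generalizing k with
  | nil => simp
  | cons y ys ih =>
      cases k with
      | zero => simp
      | succ k =>
          by_cases h : before x y
          · cases k with
            | zero => simp [PySem.List.insertBy, h]
            | succ j =>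
                simp [PySem.List.insertBy, h, List.take_succ_cons, List.take_take]
          · simp [PySem.List.insertBy, h, ih]

-- a fold of capped insertions equals the capped result of the uncapped insertion fold
theorem pv_foldl_capped {α β : Type} (before : α → α → Bool) (g : β → α) (k : Nat)
    (md : List β) (l : List α) :
    md.foldl (fun acc p => (PySem.List.insertBy before (g p) acc).take k) (l.take k)
    = (md.foldl (fun acc p => PySem.List.insertBy before (g p) acc) l).take k := by
  induction md generalizing l with
  | nil => simp
  | cons x t ih =>
      simp only [List.foldl_cons, pv_insertBy_take]
      exact ih (PySem.List.insertBy before (g x) l)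

-- B's single fold, split into its three independent components
theorem pv_fold_split (md : List (String × List (String × List (String × Int))))
    (a b : Int) (c : List (String × Int)) :
    md.foldl (fun (st : Int × Int × List (String × Int)) p =>
      let subtotal : Int := p.2.foldl (fun s yd => yd.2.foldl (fun s2 q => s2 + q.2) s) 0
      (st.1 + 1, st.2.1 + subtotal,
        (PySem.List.insertBy (fun a b => decide (b.2 < a.2)) (p.1, subtotal) st.2.2).take 20))
      (a, b, c)
    = (a + md.length, b + (md.map pvSubA).sum,
       md.foldl (fun acc p =>
         (PySem.List.insertBy (fun a b => decide (b.2 < a.2)) (p.1, pvSubA p) acc).take 20) c) := by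
  induction md generalizing a b c with
  | nil => simp
  | cons x t ih =>
      have hx : x.2.foldl (fun s yd => yd.2.foldl (fun s2 q => s2 + q.2) s) 0 = pvSubA x := by
        rw [pv_sub_eq]
        simp [pvSubA, pv_foldl_add_eq_sum]
      simp only [List.foldl_cons, hx, ih, List.map_cons, List.sum_cons, List.length_cons]
      refine Prod.ext ?_ (Prod.ext ?_ rfl) <;> simp <;> ring

-- the uncapped insertion fold is exactly A's stable reverse sort of ticker_counts
theorem pv_fold_sorted (md : List (String × List (String × List (String × Int)))) :
    md.foldl (fun acc p =>
      PySem.List.insertBy (fun a b => decide (b.2 < a.2)) (p.1, pvSubA p) acc) []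
    = PySem.List.sorted (md.map (fun p => (p.1, pvSubA p))) (fun x => x.2) true := by
  rw [PySem.List.sorted_rev_eq_foldl_insertBy, List.foldl_map]

-- the capped insertion fold from the empty list is the first 20 entries of A's stable reverse sort
theorem pv_capped_nil (md : List (String × List (String × List (String × Int)))) :
    md.foldl (fun acc p =>
      (PySem.List.insertBy (fun a b => decide (b.2 < a.2)) (p.1, pvSubA p) acc).take 20) []
    = (PySem.List.sorted (md.map (fun p => (p.1, pvSubA p))) (fun x => x.2) true).take 20 := by
  rw [← pv_fold_sorted]
  have h := pv_foldl_capped (fun a b => decide (b.2 < a.2)) (fun p => (p.1, pvSubA p)) 20 md []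
  simpa using h


-- ===== VERDICT (by name: the statement is the Claim_ definition above) =====
theorem format_summary_report_spec : Claim_equal_format_summary_report := by
  intro md _
  show format_summary_report md = format_summary_report_alt md
  unfold format_summary_report format_summary_report_alt
  simp only [pv_fold_split, pv_totalA, zero_add, pv_capped_nil]
  simp [pvSubA]
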